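-- pv_equiv track=rewrite | github.com/purseclab/Pieces | partitioner/utils/utils.py | graph_merge
-- ===== SOURCE A (Python) =====
-- def graph_merge(funcs, data):
-- 	out = funcs
-- 	for d in data:
-- 		for fun in data[d]:
-- 			if fun not in funcs:
-- 				funcs[fun] = []
-- 	for func in funcs:
-- 		for obj in data:
-- 			if func in data[obj]:
-- 				funcs[func].append(obj)
-- 	return out
-- ===== SOURCE B (Python) =====
-- def graph_merge(funcs, data):
--     # Invert the iteration: one pass over data builds the func -> objects index,
--     # then one pass merges it into funcs (mutates funcs in place, like A).
--     owners = {}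
--     for obj, objs in data.items():
--         seen = set()
--         for f in objs:
--             if f not in seen:
--                 seen.add(f)
--                 owners.setdefault(f, []).append(obj)
--     for f, objs in owners.items():
--         if f in funcs:
--             funcs[f].extend(objs)
--         else:
--             funcs[f] = objs
--     return funcs
-- ===== Notes on version B (the rewrite author's own statement) =====
-- stated objective: faster
-- what changed: B builds the inverse func->objects index in one pass over data (appending each obj to each of its first-occurrence funcs) and then merges that index into funcs, removing A's functions-times-objects scan.
import Mathlib
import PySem

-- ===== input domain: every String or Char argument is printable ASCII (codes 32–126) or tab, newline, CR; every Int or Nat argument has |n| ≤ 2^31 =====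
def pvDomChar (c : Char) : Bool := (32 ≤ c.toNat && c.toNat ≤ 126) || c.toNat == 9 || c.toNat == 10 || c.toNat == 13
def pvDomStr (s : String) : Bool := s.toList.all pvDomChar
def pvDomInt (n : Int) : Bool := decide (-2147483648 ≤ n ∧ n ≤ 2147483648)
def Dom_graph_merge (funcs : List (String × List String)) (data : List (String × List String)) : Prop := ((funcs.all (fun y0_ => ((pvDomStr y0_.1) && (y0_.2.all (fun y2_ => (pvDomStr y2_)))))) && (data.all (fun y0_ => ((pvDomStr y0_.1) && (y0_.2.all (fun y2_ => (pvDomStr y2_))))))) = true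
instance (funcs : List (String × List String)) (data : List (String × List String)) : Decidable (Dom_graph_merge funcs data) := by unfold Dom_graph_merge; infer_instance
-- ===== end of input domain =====

-- B replaces A's functions-times-objects scan by one pass over data building the inverse
-- func->objects index, then merges it into funcs, for an asymptotic speed-up;
-- both mutate funcs in place in Python and return it.

-- ===== PORT A =====
def graph_merge (funcs : List (String × List String)) (data : List (String × List String)) : List (String × List String) :=
  let F0 : PySem.Dict String (List String) := PySem.Dict.mk funcs
  let D : PySem.Dict String (List String) := PySem.Dict.mk data
  -- out = funcs (alias: A mutates funcs in place and returns it)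
  -- for d in data: for fun in data[d]: if fun not in funcs: funcs[fun] = []
  -- (data[d] cannot raise: d ranges over data's own keys, so getD is exact here)
  let F1 := D.keys.foldl (fun F d =>
    (D.getD d []).foldl (fun F fn =>
      if F.contains fn then F else F.insert fn []) F) F0
  -- for func in funcs: for obj in data: if func in data[obj]: funcs[func].append(obj)
  -- (funcs[func] exists for every iterated func, so modify with default [] is exact)
  let F2 := F1.keys.foldl (fun F func =>
    D.keys.foldl (fun F obj =>
      if (D.getD obj []).contains func then F.modify func [] (· ++ [obj]) else F) F) F1
  F2.items

-- ===== PORT B =====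
def graph_merge_alt (funcs : List (String × List String)) (data : List (String × List String)) : List (String × List String) :=
  -- owners = {}
  -- for obj, objs in data.items():
  --   seen = set()
  --   for f in objs:
  --     if f not in seen: seen.add(f); owners.setdefault(f, []).append(obj)
  -- (data has unique keys by Pre_, so iterating the association list is dict iteration)
  let owners : PySem.Dict String (List String) :=
    data.foldl (fun ow p =>
      (p.2.foldl
        (fun (st : PySem.Set String × PySem.Dict String (List String)) f =>
          if PySem.Set.contains st.1 f then st
          else (PySem.Set.add st.1 f, (st.2.setdefault f []).modify f [] (· ++ [p.1])))
        (PySem.Set.empty, ow)).2)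
      PySem.Dict.empty
  -- for f, objs in owners.items(): funcs[f].extend(objs) if f in funcs else funcs[f] = objs
  let F : PySem.Dict String (List String) := PySem.Dict.mk funcs
  (owners.items.foldl
    (fun F q => if F.contains q.1 then F.modify q.1 [] (· ++ q.2) else F.insert q.1 q.2)
    F).items

-- ===== PRECONDITION & SPEC =====
-- Pre_ excludes association lists with duplicate keys: they do not represent a Python
-- dict (dict construction collapses duplicates before graph_merge ever runs).
def Pre_graph_merge (funcs : List (String × List String)) (data : List (String × List String)) : Prop :=
  (funcs.map Prod.fst).Nodup ∧ (data.map Prod.fst).Nodup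
instance (funcs : List (String × List String)) (data : List (String × List String)) : Decidable (Pre_graph_merge funcs data) := by unfold Pre_graph_merge; infer_instance
def pvWitness_graph_merge : (List (String × List String)) × (List (String × List String)) :=
  ([("f", ["a"])], [("a", ["f", "g"]), ("b", ["f"])])
def Spec_graph_merge (funcs : List (String × List String)) (data : List (String × List String)) (out : List (String × List String)) : Prop := out = graph_merge_alt funcs data
instance (funcs : List (String × List String)) (data : List (String × List String)) (out : List (String × List String)) : Decidable (Spec_graph_merge funcs data out) := by unfold Spec_graph_merge; infer_instance

-- ===== CLAIM (what is proved, stated in full; the proofs are below) =====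
def Claim_equal_graph_merge : Prop := ∀ (funcs : List (String × List String)) (data : List (String × List String)), Dom_graph_merge funcs data → Pre_graph_merge funcs data → Spec_graph_merge funcs data (graph_merge funcs data)


-- ===== LEMMAS AND PROOFS =====

-- A phase 1, inner loop (guarded insert of []): keys grow like a Python set update …
theorem pvA_guard_keys (l : List String) (F : PySem.Dict String (List String)) :
    (l.foldl (fun F fn => if F.contains fn then F else F.insert fn []) F).keys
      = PySem.Set.update F.keys l := by
  induction l generalizing F with
  | nil => rfl
  | cons fn l ih =>
      simp only [List.foldl_cons]
      rw [PySem.Set.update_cons]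
      by_cases hc : F.contains fn = true
      · rw [if_pos hc, ih,
            PySem.Set.add_of_mem ((PySem.Dict.contains_iff_mem_keys F fn).mp hc)]
      · rw [if_neg hc, ih, PySem.Dict.keys_insert_of_not_contains _ _ (by simpa using hc),
            PySem.Set.add_of_not_mem (fun h => hc ((PySem.Dict.contains_iff_mem_keys F fn).mpr h))]

-- … while every lookup with default [] is unchanged (new keys get value []).
theorem pvA_guard_getD (l : List String) (F : PySem.Dict String (List String)) (k : String) :
    ((l.foldl (fun F fn => if F.contains fn then F else F.insert fn []) F).getD k [])
      = F.getD k [] := by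
  induction l generalizing F with
  | nil => rfl
  | cons fn l ih =>
      simp only [List.foldl_cons]
      by_cases hc : F.contains fn = true
      · rw [if_pos hc, ih]
      · rw [if_neg hc, ih, PySem.Dict.getD_insert]
        split_ifs with h
        · subst h
          exact (PySem.Dict.getD_of_not_contains _ ([] : List String) (by simpa using hc)).symm
        · rfl

-- A phase 1, both loops.
theorem pvA_phase1_keys (vs : List (List String)) (F : PySem.Dict String (List String)) :
    ((vs.foldl (fun F v => v.foldl (fun F fn => if F.contains fn then F else F.insert fn []) F) F).keys)
      = PySem.Set.update F.keys vs.flatten := by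
  induction vs generalizing F with
  | nil => rfl
  | cons v vs ih =>
      simp only [List.foldl_cons, List.flatten_cons]
      rw [ih, pvA_guard_keys, PySem.Set.update_append]

theorem pvA_phase1_getD (vs : List (List String)) (F : PySem.Dict String (List String)) (k : String) :
    ((vs.foldl (fun F v => v.foldl (fun F fn => if F.contains fn then F else F.insert fn []) F) F).getD k [])
      = F.getD k [] := by
  induction vs generalizing F with
  | nil => rfl
  | cons v vs ih =>
      simp only [List.foldl_cons]
      rw [ih, pvA_guard_getD]

-- A phase 1 iterates data[d] over data's keys; with unique keys that is the values list.
theorem pvA_phase1_eq (D F : PySem.Dict String (List String)) (hnd : D.keys.Nodup) :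
    D.keys.foldl (fun F d =>
      (D.getD d []).foldl (fun F fn => if F.contains fn then F else F.insert fn []) F) F
    = D.values.foldl (fun F v =>
        v.foldl (fun F fn => if F.contains fn then F else F.insert fn []) F) F := by
  rw [PySem.Dict.values_eq_map_keys D hnd [], List.foldl_map]

-- A phase 2, inner loop: effect on the value at any key k'.
theorem pv_innerA (l : List String) (P : String → Bool) (k : String)
    (F : PySem.Dict String (List String)) (k' : String) :
    ((l.foldl (fun F o => if P o then F.modify k [] (· ++ [o]) else F) F).getD k' [])
      = if k' = k then F.getD k' [] ++ l.filter P else F.getD k' [] := by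
  induction l generalizing F with
  | nil => simp
  | cons o l ih =>
      simp only [List.foldl_cons, List.filter_cons]
      by_cases hp : P o = true
      · rw [if_pos hp, if_pos hp, ih]
        by_cases h : k' = k <;> simp [h, PySem.Dict.getD_modify]
      · rw [if_neg hp, if_neg hp, ih]

-- A phase 2, inner loop leaves the key list unchanged when the modified key is present.
theorem pv_innerA_keys (l : List String) (P : String → Bool) (k : String)
    (F : PySem.Dict String (List String)) (hk : k ∈ F.keys) :
    ((l.foldl (fun F o => if P o then F.modify k [] (· ++ [o]) else F) F).keys) = F.keys := by
  induction l generalizing F with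
  | nil => rfl
  | cons o l ih =>
      simp only [List.foldl_cons]
      by_cases hp : P o = true
      · have hkeys : (F.modify k [] (· ++ [o])).keys = F.keys := by
          rw [PySem.Dict.keys_modify,
              PySem.Dict.keys_insert_of_contains _ _ ((PySem.Dict.contains_iff_mem_keys F k).mpr hk)]
        rw [if_pos hp, ih _ (by rw [hkeys]; exact hk), hkeys]
      · rw [if_neg hp]
        exact ih _ hk

-- A phase 2, outer loop: value at k after processing all funcs in K (K nodup).
theorem pv_outerA (D : PySem.Dict String (List String)) (K : List String)
    (F : PySem.Dict String (List String)) (k : String) (hK : K.Nodup) :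
    ((K.foldl (fun F func =>
        D.keys.foldl (fun F obj =>
          if (D.getD obj []).contains func then F.modify func [] (· ++ [obj]) else F) F) F).getD k [])
      = F.getD k [] ++ (if k ∈ K then D.keys.filter (fun o => (D.getD o []).contains k) else []) := by
  induction K generalizing F with
  | nil => simp
  | cons func K ih =>
      simp only [List.foldl_cons]
      rw [ih _ (List.Nodup.of_cons hK), pv_innerA]
      by_cases h : k = func
      · subst h
        have hnot : k ∉ K := (List.nodup_cons.mp hK).1
        simp [hnot]
      · simp [fun hh => h hh]

-- A phase 2 keeps the key list when every processed func is a key.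
theorem pv_outerA_keys (D : PySem.Dict String (List String)) (K : List String)
    (F : PySem.Dict String (List String)) (hK : ∀ x ∈ K, x ∈ F.keys) :
    ((K.foldl (fun F func =>
        D.keys.foldl (fun F obj =>
          if (D.getD obj []).contains func then F.modify func [] (· ++ [obj]) else F) F) F).keys)
      = F.keys := by
  induction K generalizing F with
  | nil => rfl
  | cons func K ih =>
      simp only [List.foldl_cons]
      have h1 := pv_innerA_keys D.keys (fun o => (D.getD o []).contains func) func F
        (hK func (List.mem_cons_self))
      rw [ih _ (fun x hx => by rw [h1]; exact hK x (List.mem_cons_of_mem _ hx)), h1]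

-- A's per-func objects list equals the data-order filter on the association list.
theorem pv_objs_eq (D : PySem.Dict String (List String)) (hnd : D.keys.Nodup) (k : String) :
    D.keys.filter (fun o => (D.getD o []).contains k)
      = (D.items.filter (fun p => p.2.contains k)).map Prod.fst := by
  have hkeys : D.keys = D.items.map Prod.fst := rfl
  rw [hkeys, List.filter_map]
  congr 1
  refine List.filter_congr (fun p hp => ?_)
  have hv : D.getD p.1 [] = p.2 :=
    PySem.Dict.getD_of_mem_items D (by exact hp) hnd []
  simp [Function.comp, hv]

-- B, inner owners loop: key list (needs seen ⊆ keys, true from the start of each pass).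
theorem pvB_inner_keys (objs : List String) (obj : String) (seen : PySem.Set String)
    (ow : PySem.Dict String (List String)) (h : ∀ x ∈ seen, x ∈ ow.keys) :
    (((objs.foldl
        (fun (st : PySem.Set String × PySem.Dict String (List String)) f =>
          if PySem.Set.contains st.1 f then st
          else (PySem.Set.add st.1 f, (st.2.setdefault f []).modify f [] (· ++ [obj])))
        (seen, ow)).2).keys)
      = PySem.Set.update ow.keys objs := by
  induction objs generalizing seen ow with
  | nil => rfl
  | cons f objs ih =>
      simp only [List.foldl_cons]
      rw [PySem.Set.update_cons]
      by_cases hc : PySem.Set.contains seen f = true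
      · rw [if_pos hc, ih _ _ h,
            PySem.Set.add_of_mem (h f ((PySem.Set.contains_iff _ _).mp hc))]
      · rw [if_neg hc]
        have hkeys : ((ow.setdefault f []).modify f [] (· ++ [obj])).keys
            = PySem.Set.add ow.keys f := by
          by_cases hf : ow.contains f = true
          · rw [PySem.Dict.setdefault_of_contains _ _ hf, PySem.Dict.keys_modify,
                PySem.Dict.keys_insert_of_contains _ _ hf,
                PySem.Set.add_of_mem ((PySem.Dict.contains_iff_mem_keys ow f).mp hf)]
          · rw [PySem.Dict.setdefault_of_not_contains _ _ (by simpa using hf),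
                PySem.Dict.keys_modify,
                PySem.Dict.keys_insert_of_contains _ _ (PySem.Dict.contains_insert_self _ _ _),
                PySem.Dict.keys_insert_of_not_contains _ _ (by simpa using hf),
                PySem.Set.add_of_not_mem
                  (fun hm => hf ((PySem.Dict.contains_iff_mem_keys ow f).mpr hm))]
        rw [ih _ _ (fun x hx => ?_), hkeys, ← PySem.Set.update_cons, PySem.Set.update_cons]
        rw [hkeys]
        rcases (PySem.Set.mem_add _ _ _).mp hx with hx | hx
        · exact (PySem.Set.mem_add _ _ _).mpr (Or.inl (h x hx))
        · exact (PySem.Set.mem_add _ _ _).mpr (Or.inr hx)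

-- B, inner owners loop: value at k gains obj once iff k occurs in objs and was unseen.
theorem pvB_inner_getD (objs : List String) (obj : String) (seen : PySem.Set String)
    (ow : PySem.Dict String (List String)) (k : String) :
    (((objs.foldl
        (fun (st : PySem.Set String × PySem.Dict String (List String)) f =>
          if PySem.Set.contains st.1 f then st
          else (PySem.Set.add st.1 f, (st.2.setdefault f []).modify f [] (· ++ [obj])))
        (seen, ow)).2).getD k [])
      = ow.getD k [] ++ (if k ∈ objs ∧ k ∉ seen then [obj] else []) := by
  induction objs generalizing seen ow with
  | nil => simp
  | cons f objs ih =>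
      simp only [List.foldl_cons]
      by_cases hc : PySem.Set.contains seen f = true
      · rw [if_pos hc, ih]
        have hfseen : f ∈ seen := (PySem.Set.contains_iff _ _).mp hc
        by_cases hk : k = f
        · subst hk; simp [hfseen]
        · simp [List.mem_cons, hk]
      · rw [if_neg hc]
        have hfseen : f ∉ seen := fun hm => hc ((PySem.Set.contains_iff _ _).mpr hm)
        have hgd : ((ow.setdefault f []).modify f [] (· ++ [obj])).getD k []
            = ow.getD k [] ++ (if k = f then [obj] else []) := by
          rw [PySem.Dict.getD_modify]
          by_cases hk : k = f
          · subst hk; simp [PySem.Dict.getD_setdefault_self]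
          · rw [if_neg hk, if_neg hk, PySem.Dict.getD_eq_get?_getD,
                PySem.Dict.get?_setdefault_of_ne _ _ hk, ← PySem.Dict.getD_eq_get?_getD]
            simp
        rw [ih, hgd]
        by_cases hk : k = f
        · subst hk
          simp [hfseen]
        · have hmem : k ∈ PySem.Set.add seen f ↔ k ∈ seen := by
            rw [PySem.Set.mem_add]
            exact ⟨fun h => h.elim id (fun h => absurd h hk), Or.inl⟩
          simp [hk, hmem, List.mem_cons]

-- B, outer owners loop: key list is the set of all funcs in data order.
theorem pvB_owners_keys (L : List (String × List String)) (ow : PySem.Dict String (List String)) :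
    ((L.foldl (fun ow p =>
        (p.2.foldl
          (fun (st : PySem.Set String × PySem.Dict String (List String)) f =>
            if PySem.Set.contains st.1 f then st
            else (PySem.Set.add st.1 f, (st.2.setdefault f []).modify f [] (· ++ [p.1])))
          (PySem.Set.empty, ow)).2) ow).keys)
      = PySem.Set.update ow.keys (L.map Prod.snd).flatten := by
  induction L generalizing ow with
  | nil => rfl
  | cons p L ih =>
      simp only [List.foldl_cons, List.map_cons, List.flatten_cons]
      rw [ih, pvB_inner_keys p.2 p.1 PySem.Set.empty ow (fun x hx => absurd hx List.not_mem_nil),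
          PySem.Set.update_append]

-- B, outer owners loop: value at k is the data-order objects list of k.
theorem pvB_owners_getD (L : List (String × List String)) (ow : PySem.Dict String (List String))
    (k : String) :
    ((L.foldl (fun ow p =>
        (p.2.foldl
          (fun (st : PySem.Set String × PySem.Dict String (List String)) f =>
            if PySem.Set.contains st.1 f then st
            else (PySem.Set.add st.1 f, (st.2.setdefault f []).modify f [] (· ++ [p.1])))
          (PySem.Set.empty, ow)).2) ow).getD k [])
      = ow.getD k [] ++ (L.filter (fun p => p.2.contains k)).map Prod.fst := by
  induction L generalizing ow with
  | nil => simp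
  | cons p L ih =>
      simp only [List.foldl_cons, List.filter_cons]
      rw [ih, pvB_inner_getD p.2 p.1 PySem.Set.empty ow k]
      by_cases h : k ∈ p.2
      · simp [h]
      · simp [h]

-- B, merge loop: key list.
theorem pvB_merge_keys (L : List (String × List String)) (F : PySem.Dict String (List String)) :
    ((L.foldl (fun F q =>
        if F.contains q.1 then F.modify q.1 [] (· ++ q.2) else F.insert q.1 q.2) F).keys)
      = PySem.Set.update F.keys (L.map Prod.fst) := by
  induction L generalizing F with
  | nil => rfl
  | cons q L ih =>
      simp only [List.foldl_cons, List.map_cons]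
      rw [PySem.Set.update_cons]
      by_cases hc : F.contains q.1 = true
      · rw [if_pos hc, ih, PySem.Dict.keys_modify, PySem.Dict.keys_insert_of_contains _ _ hc,
            PySem.Set.add_of_mem ((PySem.Dict.contains_iff_mem_keys F q.1).mp hc)]
      · rw [if_neg hc, ih, PySem.Dict.keys_insert_of_not_contains _ _ (by simpa using hc),
            PySem.Set.add_of_not_mem
              (fun hm => hc ((PySem.Dict.contains_iff_mem_keys F q.1).mpr hm))]

-- B, merge loop: value at k.
theorem pvB_merge_getD (L : List (String × List String)) (F : PySem.Dict String (List String))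
    (k : String) :
    ((L.foldl (fun F q =>
        if F.contains q.1 then F.modify q.1 [] (· ++ q.2) else F.insert q.1 q.2) F).getD k [])
      = F.getD k [] ++ (L.filter (fun q => q.1 == k)).flatMap (fun q => q.2) := by
  induction L generalizing F with
  | nil => simp
  | cons q L ih =>
      simp only [List.foldl_cons, List.filter_cons]
      by_cases hc : F.contains q.1 = true
      · rw [if_pos hc, ih, PySem.Dict.getD_modify]
        by_cases hk : k = q.1
        · subst hk; simp
        · have : ¬ (q.1 == k) = true := by simpa using fun h => hk h.symm
          simp [hk, this]
      · rw [if_neg hc, ih, PySem.Dict.getD_insert]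
        by_cases hk : k = q.1
        · subst hk
          rw [PySem.Dict.getD_of_not_contains _ ([] : List String) (by simpa using hc)]
          simp
        · have : ¬ (q.1 == k) = true := by simpa using fun h => hk h.symm
          simp [hk, this]

-- On a dict with unique keys the merged suffix at k is exactly the stored value.
theorem pv_filter_items (d : PySem.Dict String (List String)) (hnd : d.keys.Nodup) (k : String) :
    ((d.items.filter (fun q => q.1 == k)).flatMap (fun q => q.2)) = d.getD k [] := by
  rw [PySem.Dict.items_eq_map_keys d hnd ([] : List String), List.filter_map]
  have hcomp : ((fun q : String × List String => q.1 == k) ∘ fun k' => (k', d.getD k' []))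
      = fun k' => k' == k := rfl
  rw [hcomp, List.filter_beq]
  by_cases hk : k ∈ d.keys
  · rw [List.count_eq_one_of_mem hnd hk]
    simp
  · rw [List.count_eq_zero_of_not_mem hk]
    rw [PySem.Dict.getD_of_not_contains _ ([] : List String)
      (by simpa using fun h => hk ((PySem.Dict.contains_iff_mem_keys d k).mp h))]
    simp

-- Updating with the deduplicated list updates with the list.
theorem pv_update_ofList (s : PySem.Set String) (xs : List String) :
    PySem.Set.update s (PySem.Set.ofList xs) = PySem.Set.update s xs := by
  rw [PySem.Set.update_eq_append_filter, PySem.Set.update_eq_append_filter, PySem.Set.ofList_ofList]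

-- ===== VERDICT (by name: the statement is the Claim_ definition above) =====
theorem graph_merge_spec : Claim_equal_graph_merge := by
  intro funcs data _hdom hpre
  obtain ⟨hf, hd⟩ := hpre
  show graph_merge funcs data = graph_merge_alt funcs data
  simp only [graph_merge, graph_merge_alt]
  set F0 : PySem.Dict String (List String) := PySem.Dict.mk funcs with hF0
  set D : PySem.Dict String (List String) := PySem.Dict.mk data with hD
  have hndD : D.keys.Nodup := hd
  have hndF0 : F0.keys.Nodup := hf
  rw [pvA_phase1_eq D F0 hndD]
  set F1 := D.values.foldl (fun F v =>
    v.foldl (fun F fn => if F.contains fn then F else F.insert fn []) F) F0 with hF1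
  set owners := data.foldl (fun ow p =>
      (p.2.foldl
        (fun (st : PySem.Set String × PySem.Dict String (List String)) f =>
          if PySem.Set.contains st.1 f then st
          else (PySem.Set.add st.1 f, (st.2.setdefault f []).modify f [] (· ++ [p.1])))
        (PySem.Set.empty, ow)).2) PySem.Dict.empty with hO
  -- the flat list of all funcs mentioned in data, in data order
  have hvals : D.values = data.map Prod.snd := rfl
  have hK1 : F1.keys = PySem.Set.update F0.keys (data.map Prod.snd).flatten := by
    rw [hF1, pvA_phase1_keys, hvals]
  have hnd1 : F1.keys.Nodup := by rw [hK1]; exact PySem.Set.nodup_update _ _ hndF0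
  have hOK : owners.keys = PySem.Set.ofList (data.map Prod.snd).flatten := by
    rw [hO, pvB_owners_keys]
    rfl
  have hOnd : owners.keys.Nodup := by rw [hOK]; exact PySem.Set.nodup_ofList _
  have hkA := pv_outerA_keys D F1.keys F1 (fun x hx => hx)
  have hkB := pvB_merge_keys owners.items F0
  have hkeq : PySem.Set.update F0.keys (owners.items.map Prod.fst)
      = PySem.Set.update F0.keys (data.map Prod.snd).flatten := by
    have : owners.items.map Prod.fst = owners.keys := rfl
    rw [this, hOK, pv_update_ofList]
  rw [PySem.Dict.items_eq_map_keys _ (by rw [hkA]; exact hnd1) ([] : List String),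
      PySem.Dict.items_eq_map_keys _ (by rw [hkB, hkeq, ← hK1]; exact hnd1) ([] : List String),
      hkA, hkB, hkeq, ← hK1]
  refine List.map_congr_left (fun k hk => ?_)
  have hA : (F1.keys.foldl (fun F func =>
      D.keys.foldl (fun F obj =>
        if (D.getD obj []).contains func then F.modify func [] (· ++ [obj]) else F) F) F1).getD k []
      = F0.getD k [] ++ (data.filter (fun p => p.2.contains k)).map Prod.fst := by
    rw [pv_outerA D F1.keys F1 k hnd1, if_pos hk, pv_objs_eq D hndD k]
    rw [hF1, pvA_phase1_getD]
  have hB : (owners.items.foldl (fun F q =>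
      if F.contains q.1 then F.modify q.1 [] (· ++ q.2) else F.insert q.1 q.2) F0).getD k []
      = F0.getD k [] ++ (data.filter (fun p => p.2.contains k)).map Prod.fst := by
    rw [pvB_merge_getD, pv_filter_items owners hOnd k, hO, pvB_owners_getD]
    simp
  rw [hA, hB]
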